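-- pv_equiv track=rewrite | github.com/Zhonghao1995/agentic-swmm-workflow | agentic_swmm/cli.py | _agent_options_without_goal
-- ===== SOURCE A (Python) =====
-- def _agent_options_without_goal(argv: list[str]) -> bool:
--     options_with_values = {"--provider", "--model", "--session-id", "--session-dir", "--max-steps"}
--     flags = {"--dry-run", "--interactive", "--verbose"}
--     index = 0
--     while index < len(argv):
--         item = argv[index]
--         if item in options_with_values:
--             index += 2
--             continue
--         if item in flags:
--             index += 1
--             continue
--         return False
--     return True
-- ===== SOURCE B (Python) =====
-- def _agent_options_without_goal(argv: list[str]) -> bool: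
--     # Backward DP: a = "suffix argv[i:] is valid", b = "suffix argv[i+1:] is valid",
--     # computed from the shortest suffixes upward; empty/overrun suffixes are valid.
--     options_with_values = {"--provider", "--model", "--session-id", "--session-dir", "--max-steps"}
--     flags = {"--dry-run", "--interactive", "--verbose"}
--     a, b = True, True
--     for item in reversed(argv):
--         cur = b if item in options_with_values else (a if item in flags else False)
--         a, b = cur, a
--     return a
-- ===== Notes on version B (the rewrite author's own statement) =====
-- stated objective: alternative
-- what changed: Replaced A's forward while-loop with index strides and an early return by a backward dynamic-programming scan over reversed(argv) carrying two rolling booleans (validity of the two shortest suffixes), returning the validity of the full list with no early exit.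
import Mathlib
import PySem

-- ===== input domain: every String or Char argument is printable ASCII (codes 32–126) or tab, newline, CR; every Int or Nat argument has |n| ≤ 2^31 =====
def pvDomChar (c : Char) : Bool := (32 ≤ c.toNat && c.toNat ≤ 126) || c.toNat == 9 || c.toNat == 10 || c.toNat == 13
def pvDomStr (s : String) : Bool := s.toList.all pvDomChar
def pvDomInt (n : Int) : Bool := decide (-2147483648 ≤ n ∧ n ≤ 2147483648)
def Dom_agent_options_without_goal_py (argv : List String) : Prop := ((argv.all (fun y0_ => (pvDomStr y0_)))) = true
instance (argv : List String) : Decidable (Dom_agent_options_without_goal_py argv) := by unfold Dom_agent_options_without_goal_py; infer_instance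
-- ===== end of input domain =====

-- B replaces A's forward index-stride loop with early return by a backward DP scan carrying two rolling suffix-validity booleans (alternative algorithm, same cost).


def pvOptsWithValues : List String := ["--provider", "--model", "--session-id", "--session-dir", "--max-steps"]
def pvFlags : List String := ["--dry-run", "--interactive", "--verbose"]

-- ===== PORT A =====
-- the while loop over the index, stride 2 for value options, 1 for flags, early return false
def agentLoopA (argv : List String) (index : Nat) : Bool :=
  if h : index < argv.length then
    let item := argv[index]
    if item ∈ pvOptsWithValues then agentLoopA argv (index + 2)
    else if item ∈ pvFlags then agentLoopA argv (index + 1)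
    else false
  else true
termination_by argv.length - index

def agent_options_without_goal_py (argv : List String) : Bool := agentLoopA argv 0

-- ===== PORT B =====
-- one DP step over an item: state (a, b) = (validity of suffix after item, validity of suffix after that)
def agentStepB (s : Bool × Bool) (item : String) : Bool × Bool :=
  let cur := if item ∈ pvOptsWithValues then s.2 else if item ∈ pvFlags then s.1 else false
  (cur, s.1)

-- the for-loop over reversed(argv), starting from (True, True), answer is the final a
def agent_options_without_goal_py_alt (argv : List String) : Bool :=
  (argv.reverse.foldl agentStepB (true, true)).1

-- ===== PRECONDITION & SPEC =====
def Spec_agent_options_without_goal_py (argv : List String) (out : Bool) : Prop := out = agent_options_without_goal_py_alt argv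
instance (argv : List String) (out : Bool) : Decidable (Spec_agent_options_without_goal_py argv out) := by unfold Spec_agent_options_without_goal_py; infer_instance

-- ===== CLAIM (what is proved, stated in full; the proofs are below) =====
def Claim_equal_agent_options_without_goal_py : Prop := ∀ (argv : List String), Dom_agent_options_without_goal_py argv → Spec_agent_options_without_goal_py argv (agent_options_without_goal_py argv)

-- ===== LEMMAS AND PROOFS =====

-- the backward fold written as a foldr (the loop over reversed(argv) is exactly a right fold)
def agentTableB (l : List String) : Bool × Bool := l.foldr (fun x s => agentStepB s x) (true, true)

theorem foldl_reverse_eq_table (l : List String) :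
    l.reverse.foldl agentStepB (true, true) = agentTableB l := by
  simp [agentTableB, List.foldl_reverse]

theorem table_fst (x : String) (r : List String) :
    (agentTableB (x :: r)).1 =
      if x ∈ pvOptsWithValues then (agentTableB r).2
      else if x ∈ pvFlags then (agentTableB r).1 else false := rfl

theorem table_snd (x : String) (r : List String) :
    (agentTableB (x :: r)).2 = (agentTableB r).1 := rfl

theorem agentLoop_eq_table (argv : List String) (index : Nat) :
    agentLoopA argv index = (agentTableB (argv.drop index)).1 := by
  generalize hn : argv.length - index = n
  induction n using Nat.strong_induction_on generalizing index with
  | _ n ih =>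
    rw [agentLoopA]
    by_cases h : index < argv.length
    · simp only [h, dif_pos]
      have hdrop : argv.drop index = argv[index] :: argv.drop (index + 1) :=
        List.drop_eq_getElem_cons h
      rw [hdrop, table_fst]
      by_cases ho : argv[index] ∈ pvOptsWithValues
      · rw [if_pos ho, if_pos ho, ih (argv.length - (index + 2)) (by omega) (index + 2) rfl]
        by_cases h1 : index + 1 < argv.length
        · have hdrop1 : argv.drop (index + 1) = argv[index + 1] :: argv.drop (index + 2) :=
            List.drop_eq_getElem_cons h1
          rw [hdrop1, table_snd]
        · have e1 : argv.drop (index + 1) = [] := List.drop_eq_nil_of_le (by omega)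
          have e2 : argv.drop (index + 2) = [] := List.drop_eq_nil_of_le (by omega)
          rw [e1, e2]
          rfl
      · rw [if_neg ho, if_neg ho]
        by_cases hf : argv[index] ∈ pvFlags
        · rw [if_pos hf, if_pos hf, ih (argv.length - (index + 1)) (by omega) (index + 1) rfl]
        · rw [if_neg hf, if_neg hf]
    · simp only [h, dif_neg, not_false_iff]
      rw [List.drop_eq_nil_of_le (by omega)]
      rfl

-- ===== VERDICT (by name: the statement is the Claim_ definition above) =====
theorem agent_options_without_goal_py_spec : Claim_equal_agent_options_without_goal_py := by
  intro argv _
  unfold Spec_agent_options_without_goal_py agent_options_without_goal_py agent_options_without_goal_py_alt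
  rw [foldl_reverse_eq_table]
  simpa using agentLoop_eq_table argv 0
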